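-- pv_equiv track=rewrite | github.com/AntuanW/ASD-2022 | BitAlgo/zajęcia 2 28-03-22/bitalgo2.py | zad4
-- ===== SOURCE A (Python) =====
-- def zad4(A, x):
--     def find_id(A, x):
--         ind = 1
--         while A[ind] is not None and A[ind] <= x:
--             ind *= 2
--         return ind
--
--     left = 0
--     right = find_id(A, x)
--
--     while left <= right:
--         ind = (left + right) // 2
--
--         if A[ind] is None or A[ind] > x:
--             right = ind - 1
--
--         elif A[ind] < x:
--             left = ind + 1
--
--         else:
--             return ind
--
--     return -1
-- ===== SOURCE B (Python) =====
-- def zad4(A, x):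
--     # Gallop on the EXPONENT k (index 2**k), then a recursive binary search
--     # that recurses on the interval LENGTH instead of (left, right) bounds.
--     k = 0
--     while A[2 ** k] is not None and A[2 ** k] <= x:
--         k += 1
--
--     def search(lo, cnt):
--         if cnt == 0:
--             return -1
--         half = (cnt - 1) // 2
--         mid = lo + half
--         v = A[mid]
--         if v is None or v > x:
--             return search(lo, half)
--         if v < x:
--             return search(mid + 1, cnt - 1 - half)
--         return mid
--
--     return search(0, 2 ** k + 1)
-- ===== Notes on version B (the rewrite author's own statement) =====
-- stated objective: alternative
-- what changed: B gallops on the exponent k (probing index 2**k) instead of doubling an index, and replaces the iterative (left,right) binary-search loop by a recursive search on (lo, interval-length) over naturals.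
import Mathlib
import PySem

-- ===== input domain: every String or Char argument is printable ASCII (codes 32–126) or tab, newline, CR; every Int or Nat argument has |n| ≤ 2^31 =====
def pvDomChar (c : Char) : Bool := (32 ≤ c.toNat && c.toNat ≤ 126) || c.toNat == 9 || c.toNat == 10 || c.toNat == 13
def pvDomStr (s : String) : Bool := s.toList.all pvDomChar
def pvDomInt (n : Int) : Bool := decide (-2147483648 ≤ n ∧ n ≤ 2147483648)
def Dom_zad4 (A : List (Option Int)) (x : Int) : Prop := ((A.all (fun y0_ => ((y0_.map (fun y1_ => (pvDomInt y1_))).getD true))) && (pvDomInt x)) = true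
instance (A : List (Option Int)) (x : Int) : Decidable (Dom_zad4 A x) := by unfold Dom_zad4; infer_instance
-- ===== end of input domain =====

-- B replaces A's index-doubling gallop by a gallop on the exponent, and A's
-- iterative (left,right) binary-search loop by a recursion on the interval length.

-- ===== PORT A =====
-- inner `find_id` while loop, fueled (fuel only makes the loop total; exhaustion
-- and the IndexError case `A[ind]` out of range are excluded by Pre_zad4)
def zad4Gallop (A : List (Option Int)) (x : Int) : Nat → Int → Int
  | 0, ind => ind
  | fuel + 1, ind =>
    match PySem.List.pyGet? A ind with
    | none => ind                       -- IndexError in Python (outside Pre_zad4)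
    | some none => ind                  -- A[ind] is None: loop condition fails
    | some (some v) => if v ≤ x then zad4Gallop A x fuel (2 * ind) else ind

-- the `while left <= right` binary-search loop, fueled
def zad4Loop (A : List (Option Int)) (x : Int) : Nat → Int → Int → Int
  | 0, _, _ => -1                       -- fuel exhaustion (never reached under Pre_zad4)
  | fuel + 1, left, right =>
    if left ≤ right then
      let ind := PySem.Int.floordiv (left + right) 2
      match PySem.List.pyGet? A ind with
      | none => -1                      -- IndexError in Python (outside Pre_zad4)
      | some none => zad4Loop A x fuel left (ind - 1)        -- A[ind] is None
      | some (some v) =>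
        if v > x then zad4Loop A x fuel left (ind - 1)
        else if v < x then zad4Loop A x fuel (ind + 1) right
        else ind
    else -1

def zad4 (A : List (Option Int)) (x : Int) : Int :=
  let right := zad4Gallop A x (A.length + 2) 1
  zad4Loop A x (A.length + 2) 0 right

-- ===== PORT B =====
-- Source B's first while loop: gallop on the exponent k, probing index 2^k
-- (fuel only makes it total; exhaustion/IndexError are excluded by Pre_zad4)
def zad4AltGallop (A : List (Option Int)) (x : Int) : Nat → Nat → Nat
  | 0, k => k                          -- fuel exhaustion (outside Pre_zad4)
  | fuel + 1, k =>
    match PySem.List.pyGet? A ((2 ^ k : Nat) : Int) with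
    | none => k                        -- IndexError in Python (outside Pre_zad4)
    | some none => k
    | some (some v) => if v ≤ x then zad4AltGallop A x fuel (k + 1) else k

-- Source B's `search(lo, cnt)`: recursion on the interval LENGTH cnt (a Nat),
-- well-founded because both recursive calls shrink cnt; no fuel needed
def zad4AltSearch (A : List (Option Int)) (x : Int) (lo : Nat) : Nat → Int
  | 0 => -1
  | cnt + 1 =>
    let half := cnt / 2                -- = (count - 1) // 2 for count = cnt + 1
    let mid := lo + half
    match PySem.List.pyGet? A ((mid : Nat) : Int) with
    | none => -1                       -- IndexError in Python (outside Pre_zad4)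
    | some none => zad4AltSearch A x lo half
    | some (some v) =>
      if v > x then zad4AltSearch A x lo half
      else if v < x then zad4AltSearch A x (mid + 1) (cnt - half)
      else (mid : Int)
  termination_by cnt => cnt
  decreasing_by all_goals omega

def zad4_alt (A : List (Option Int)) (x : Int) : Int :=
  zad4AltSearch A x 0 (2 ^ (zad4AltGallop A x (A.length + 2) 0) + 1)

-- ===== PRECONDITION & SPEC =====
-- the gallop stops at index i: the entry is in range and None or > x
def zad4Stop (A : List (Option Int)) (x : Int) (i : Nat) : Bool :=
  match PySem.List.pyGet? A (i : Int) with
  | none => false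
  | some none => true
  | some (some v) => decide (v > x)

-- Pre_ holds iff some power of two inside the list satisfies the gallop's exit
-- test; on exactly the other inputs A's gallop runs off the end and raises IndexError.
def Pre_zad4 (A : List (Option Int)) (x : Int) : Prop :=
  ∃ k, k < A.length ∧ 2 ^ k < A.length ∧ zad4Stop A x (2 ^ k) = true
instance (A : List (Option Int)) (x : Int) : Decidable (Pre_zad4 A x) := by
  unfold Pre_zad4; infer_instance

def pvWitness_zad4 : List (Option Int) × Int := ([some 0, none], 0)

def Spec_zad4 (A : List (Option Int)) (x : Int) (out : Int) : Prop := out = zad4_alt A x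
instance (A : List (Option Int)) (x : Int) (out : Int) : Decidable (Spec_zad4 A x out) := by
  unfold Spec_zad4; infer_instance

-- ===== CLAIM (what is proved, stated in full; the proofs are below) =====
def Claim_equal_zad4 : Prop :=
  ∀ (A : List (Option Int)) (x : Int), Dom_zad4 A x → Pre_zad4 A x → Spec_zad4 A x (zad4 A x)

-- ===== LEMMAS AND PROOFS =====

-- A's gallop at index 2^k equals 2^(B's gallop at exponent k), fuel for fuel
theorem gallop_eq (A : List (Option Int)) (x : Int) :
    ∀ (fuel k : Nat),
      zad4Gallop A x fuel ((2 ^ k : Nat) : Int)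
        = ((2 ^ (zad4AltGallop A x fuel k) : Nat) : Int) := by
  intro fuel
  induction fuel with
  | zero => intro k; rfl
  | succ fuel ih =>
    intro k
    simp only [zad4Gallop, zad4AltGallop]
    cases hg : PySem.List.pyGet? A ((2 ^ k : Nat) : Int) with
    | none => rfl
    | some o =>
      cases o with
      | none => rfl
      | some v =>
        by_cases hv : v ≤ x
        · simp only [if_pos hv]
          have hc : (2 : Int) * ((2 ^ k : Nat) : Int) = ((2 ^ (k + 1) : Nat) : Int) := by
            push_cast; ring
          rw [hc, ih (k + 1)]
        · simp only [if_neg hv]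

-- B's gallop result is ≤ any exponent whose index satisfies the stop test
theorem gallop_le (A : List (Option Int)) (x : Int) :
    ∀ (fuel k0 kp : Nat), zad4Stop A x (2 ^ kp) = true → k0 ≤ kp → kp < k0 + fuel →
      zad4AltGallop A x fuel k0 ≤ kp := by
  intro fuel
  induction fuel with
  | zero => intro k0 kp _ h1 h2; omega
  | succ fuel ih =>
    intro k0 kp hstop h1 h2
    simp only [zad4AltGallop]
    cases hg : PySem.List.pyGet? A ((2 ^ k0 : Nat) : Int) with
    | none => exact h1
    | some o =>
      cases o with
      | none => exact h1
      | some v =>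
        by_cases hv : v ≤ x
        · simp only [if_pos hv]
          refine ih (k0 + 1) kp hstop ?_ (by omega)
          rcases Nat.lt_or_ge k0 kp with h | h
          · omega
          · -- k0 = kp would contradict the stop test at 2^kp
            exfalso
            have hke : k0 = kp := by omega
            rw [← hke] at hstop
            simp only [zad4Stop, hg, decide_eq_true_eq] at hstop
            omega
        · simp only [if_neg hv]; exact h1

-- A's loop on [lo, lo+cnt-1] equals B's search on (lo, cnt), given enough fuel
theorem loop_search (A : List (Option Int)) (x : Int) :
    ∀ (cnt fuel lo : Nat), cnt < fuel →
      zad4Loop A x fuel (lo : Int) ((lo : Int) + (cnt : Int) - 1)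
        = zad4AltSearch A x lo cnt := by
  intro cnt
  induction cnt using Nat.strong_induction_on with
  | _ cnt ih =>
    intro fuel lo hf
    match cnt, fuel with
    | 0, fuel + 1 =>
      simp only [zad4Loop, zad4AltSearch]
      rw [if_neg (by push_cast; omega : ¬ (lo : Int) ≤ (lo : Int) + ((0:Nat):Int) - 1)]
    | cnt + 1, fuel + 1 =>
      simp only [zad4AltSearch, zad4Loop]
      rw [if_pos (by push_cast; omega : (lo : Int) ≤ (lo : Int) + ((cnt + 1 : Nat):Int) - 1)]
      have hmid : PySem.Int.floordiv ((lo : Int) + ((lo : Int) + ((cnt + 1 : Nat):Int) - 1)) 2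
          = ((lo + cnt / 2 : Nat) : Int) := by
        have : (lo : Int) + ((lo : Int) + ((cnt + 1 : Nat):Int) - 1) = ((2 * lo + cnt : Nat) : Int) := by
          push_cast; ring
        rw [this]
        have h2 : ((2 : Nat) : Int) = (2 : Int) := by norm_num
        rw [← h2, PySem.Int.floordiv_natCast]
        congr 1
        omega
      simp only [hmid]
      cases hg : PySem.List.pyGet? A ((lo + cnt / 2 : Nat) : Int) with
      | none => rfl
      | some o =>
        cases o with
        | none =>
          have hL := ih (cnt / 2) (by omega) fuel lo (by omega)
          have harg : ((lo + cnt / 2 : Nat) : Int) - 1 = (lo : Int) + ((cnt / 2 : Nat) : Int) - 1 := by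
            push_cast; ring
          rw [harg]; exact hL
        | some v =>
          by_cases h1 : v > x
          · simp only [if_pos h1]
            have hL := ih (cnt / 2) (by omega) fuel lo (by omega)
            have harg : ((lo + cnt / 2 : Nat) : Int) - 1 = (lo : Int) + ((cnt / 2 : Nat) : Int) - 1 := by
              push_cast; ring
            rw [harg]; exact hL
          · simp only [if_neg h1]
            by_cases h2 : v < x
            · simp only [if_pos h2]
              have hL := ih (cnt - cnt / 2) (by omega) fuel (lo + cnt / 2 + 1) (by omega)
              have ha : ((lo + cnt / 2 : Nat) : Int) + 1 = ((lo + cnt / 2 + 1 : Nat) : Int) := by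
                push_cast; ring
              have hb : (lo : Int) + ((cnt + 1 : Nat) : Int) - 1
                  = ((lo + cnt / 2 + 1 : Nat) : Int) + ((cnt - cnt / 2 : Nat) : Int) - 1 := by
                push_cast; omega
              rw [ha, hb]; exact hL
            · simp only [if_neg h2]

-- ===== VERDICT (by name: the statement is the Claim_ definition above) =====
theorem zad4_spec : Claim_equal_zad4 := by
  intro A x _ hpre
  obtain ⟨kp, hk, h2k, hstop⟩ := hpre
  unfold Spec_zad4 zad4 zad4_alt
  have hK := gallop_le A x (A.length + 2) 0 kp hstop (Nat.zero_le _) (by omega)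
  have hle : 2 ^ (zad4AltGallop A x (A.length + 2) 0) < A.length := by
    calc 2 ^ (zad4AltGallop A x (A.length + 2) 0) ≤ 2 ^ kp := Nat.pow_le_pow_right (by omega) hK
      _ < A.length := h2k
  have hg := gallop_eq A x (A.length + 2) 0
  have h1 : ((2 ^ 0 : Nat) : Int) = 1 := by norm_num
  rw [← h1, hg]
  have := loop_search A x (2 ^ (zad4AltGallop A x (A.length + 2) 0) + 1) (A.length + 2) 0
    (by omega)
  have harg : ((0:Nat):Int) + ((2 ^ (zad4AltGallop A x (A.length + 2) 0) + 1 : Nat) : Int) - 1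
      = ((2 ^ (zad4AltGallop A x (A.length + 2) 0) : Nat) : Int) := by push_cast; ring
  rw [harg] at this
  simpa using this
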